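-- pv_equiv track=rewrite | github.com/Khubaib14/Leetcode | 2089-find-target-indices-after-sorting-array/2089-find-target-indices-after-sorting-array.py | SolTwo
-- ===== SOURCE A (Python) =====
-- def SolTwo(arr, key):
--     lt_count, eq_count = 0, 0
--     for n in arr:
--         if n < key:
--             lt_count += 1
--         elif n == key:
--             eq_count += 1
--
--     return list(range(lt_count, lt_count+eq_count))
-- ===== SOURCE B (Python) =====
-- def SolTwo(arr, key):
--     return [i for i, v in enumerate(sorted(arr)) if v == key]
-- ===== Notes on version B (the rewrite author's own statement) =====
-- stated objective: alternative
-- what changed: B actually sorts a copy of the array and collects the indices of key by an enumerate scan, instead of A's two counters and a range(); the sorted block of elements equal to key is exactly range(lt, lt+eq).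
import Mathlib
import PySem

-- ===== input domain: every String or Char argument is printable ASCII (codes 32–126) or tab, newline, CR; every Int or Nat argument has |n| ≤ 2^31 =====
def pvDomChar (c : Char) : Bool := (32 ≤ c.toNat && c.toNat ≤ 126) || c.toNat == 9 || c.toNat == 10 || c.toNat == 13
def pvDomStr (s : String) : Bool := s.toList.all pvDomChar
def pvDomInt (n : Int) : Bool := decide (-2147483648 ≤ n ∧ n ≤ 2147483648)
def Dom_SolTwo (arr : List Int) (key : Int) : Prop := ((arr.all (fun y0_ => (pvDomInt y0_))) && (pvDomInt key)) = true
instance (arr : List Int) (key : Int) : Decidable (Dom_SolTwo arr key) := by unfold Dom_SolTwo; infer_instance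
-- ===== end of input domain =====

-- B sorts a copy of the array and collects the indices of key by an enumerate scan,
-- instead of A's two counters; an alternative decomposition (B is not faster).

-- ===== PORT A =====
def SolTwo (arr : List Int) (key : Int) : List Int :=
  let cnts := arr.foldl (fun (c : Int × Int) n =>
    if n < key then (c.1 + 1, c.2) else if n = key then (c.1, c.2 + 1) else c) (0, 0)
  PySem.List.pyRange cnts.1 (cnts.1 + cnts.2) 1

-- ===== PORT B =====
def SolTwo_alt (arr : List Int) (key : Int) : List Int :=
  (PySem.List.enumerate (PySem.List.sorted arr (fun x => x) false) 0).filterMap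
    (fun p => if p.2 = key then some p.1 else none)

-- ===== PRECONDITION & SPEC =====
def Spec_SolTwo (arr : List Int) (key : Int) (out : List Int) : Prop := out = SolTwo_alt arr key
instance (arr : List Int) (key : Int) (out : List Int) : Decidable (Spec_SolTwo arr key out) := by unfold Spec_SolTwo; infer_instance

-- ===== CLAIM (what is proved, stated in full; the proofs are below) =====
def Claim_equal_SolTwo : Prop := ∀ (arr : List Int) (key : Int), Dom_SolTwo arr key → Spec_SolTwo arr key (SolTwo arr key)

-- ===== LEMMAS AND PROOFS =====

theorem pyRange_ext (a b a' b' : Int) (h1 : a = a') (h2 : b = b') :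
    PySem.List.pyRange a b 1 = PySem.List.pyRange a' b' 1 := by rw [h1, h2]

-- A's fold accumulates the two countP's
theorem solTwo_fold_counts (key : Int) (l : List Int) (a b : Int) :
    l.foldl (fun (c : Int × Int) n =>
      if n < key then (c.1 + 1, c.2) else if n = key then (c.1, c.2 + 1) else c) (a, b)
    = (a + (l.countP (fun n => decide (n < key)) : Int),
       b + (l.countP (fun n => decide (n = key)) : Int)) := by
  induction l generalizing a b with
  | nil => simp
  | cons v t ih =>
    simp only [List.foldl_cons]
    by_cases h1 : v < key
    · have h2 : ¬ v = key := by omega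
      simp only [h1, h2, if_true, if_false, ite_true, ite_false, ih,
        List.countP_cons, decide_true, decide_false, Prod.mk.injEq]
      constructor <;> (push_cast; omega)
    · by_cases h2 : v = key
      · simp only [h1, h2, if_true, if_false, ite_true, ite_false, ih,
          List.countP_cons, decide_true, decide_false, lt_self_iff_false, Prod.mk.injEq]
        refine ⟨by simp, by push_cast; omega⟩
      · simp only [h1, h2, if_true, if_false, ite_true, ite_false, ih,
          List.countP_cons, decide_true, decide_false, Prod.mk.injEq]
        constructor <;> (push_cast; omega)

-- on a nondecreasing list, the indices where the value equals key form a contiguous range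
theorem solTwo_scan_sorted (key : Int) (s : List Int) (hs : s.Pairwise (· ≤ ·)) (i : Int) :
    (PySem.List.enumerate s i).filterMap (fun p => if p.2 = key then some p.1 else none)
    = PySem.List.pyRange (i + (s.countP (fun n => decide (n < key)) : Int))
        (i + (s.countP (fun n => decide (n < key)) : Int) + (s.countP (fun n => decide (n = key)) : Int)) 1 := by
  induction s generalizing i with
  | nil =>
    simp [PySem.List.enumerate_nil, PySem.List.pyRange_one_eq_nil]
  | cons v t ih =>
    have hle : ∀ y ∈ t, v ≤ y := (List.pairwise_cons.mp hs).1
    have ht : t.Pairwise (· ≤ ·) := (List.pairwise_cons.mp hs).2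
    rw [PySem.List.enumerate_cons, List.filterMap_cons]
    by_cases h2 : v = key
    · -- head is key: all of the tail is ≥ key, so no tail element is < key
      have hltz : t.countP (fun n => decide (n < key)) = 0 := by
        rw [List.countP_eq_zero]; intro y hy
        have := hle y hy; simp; omega
      simp only [h2, if_true, ite_true, if_pos]
      rw [ih ht (i + 1)]
      have hA : i + ((key :: t).countP (fun n => decide (n < key)) : Int) = i := by
        simp [List.countP_cons, hltz]
      have hB : i + ((key :: t).countP (fun n => decide (n < key)) : Int)
          + ((key :: t).countP (fun n => decide (n = key)) : Int)
          = i + 1 + (t.countP (fun n => decide (n = key)) : Int) := by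
        simp [List.countP_cons, hltz]; push_cast; ring
      have hlt : i < i + 1 + (t.countP (fun n => decide (n = key)) : Int) := by omega
      rw [pyRange_ext _ _ _ _ hA hB, PySem.List.pyRange_one_cons hlt]
      refine congrArg (List.cons i) (pyRange_ext _ _ _ _ ?_ ?_) <;> (push_cast; omega)
    · by_cases h1 : v < key
      · -- head below key: it only shifts the block right by one
        simp only [h2, if_false, ite_false]
        rw [ih ht (i + 1)]
        refine pyRange_ext _ _ _ _ ?_ ?_ <;>
          (simp only [List.countP_cons, h1, h2, decide_true, decide_false,
             if_true, if_false, ite_true, ite_false]; push_cast; omega)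
      · -- head above key: the whole list is above key, both sides empty
        have hz : ∀ y ∈ t, ¬ y < key ∧ ¬ y = key := by
          intro y hy; have := hle y hy; omega
        have hltz : t.countP (fun n => decide (n < key)) = 0 := by
          rw [List.countP_eq_zero]; intro y hy; have := hz y hy; simp; omega
        have heqz : t.countP (fun n => decide (n = key)) = 0 := by
          rw [List.countP_eq_zero]; intro y hy; have := hz y hy; simp [this.2]
        simp only [h2, if_false, ite_false]
        rw [ih ht (i + 1), PySem.List.pyRange_one_eq_nil (by simp [hltz, heqz]),
          PySem.List.pyRange_one_eq_nil
            (by simp [List.countP_cons, h1, h2, hltz, heqz])]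

-- ===== VERDICT (by name: the statement is the Claim_ definition above) =====
theorem SolTwo_spec : Claim_equal_SolTwo := by
  intro arr key _
  unfold Spec_SolTwo SolTwo SolTwo_alt
  have hperm : (PySem.List.sorted arr (fun x => x) false).Perm arr :=
    PySem.List.sorted_perm arr (fun x => x) false
  have hpw : (PySem.List.sorted arr (fun x => x) false).Pairwise (· ≤ ·) :=
    PySem.List.sorted_pairwise arr (fun x => x)
  rw [solTwo_scan_sorted key _ hpw 0, solTwo_fold_counts,
      hperm.countP_eq, hperm.countP_eq]
  simp
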